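-- pv_equiv track=rewrite | github.com/milkybearhub/Recursion | basics_of_cs/intermediate/control_flow/do_you_fail.py | doYouFail
-- ===== SOURCE A (Python) =====
-- def doYouFail(string):
--     count = 0
--     judge = "pass"
--
--     for char in string:
--         if count >= 3:
--             judge = "fail"
--             break
--
--         if char == "A": count += 1
--
--     return judge
-- ===== SOURCE B (Python) =====
-- def doYouFail(string):
--     # Split off at most three 'A'-separated pieces: there are 4 pieces exactly
--     # when the string has >= 3 'A's, and the 4th piece is everything after the
--     # third 'A' -- the loop fails exactly when that remainder is nonempty.
--     parts = string.split("A", 3)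
--     return "fail" if len(parts) == 4 and parts[3] != "" else "pass"
-- ===== Notes on version B (the rewrite author's own statement) =====
-- stated objective: faster
-- what changed: Replaced the counter-and-break loop by splitting the string on the separator with maxsplit 3 and inspecting the shape of the parts: 4 parts with a nonempty 4th part means the loop's break fired.
import Mathlib
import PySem

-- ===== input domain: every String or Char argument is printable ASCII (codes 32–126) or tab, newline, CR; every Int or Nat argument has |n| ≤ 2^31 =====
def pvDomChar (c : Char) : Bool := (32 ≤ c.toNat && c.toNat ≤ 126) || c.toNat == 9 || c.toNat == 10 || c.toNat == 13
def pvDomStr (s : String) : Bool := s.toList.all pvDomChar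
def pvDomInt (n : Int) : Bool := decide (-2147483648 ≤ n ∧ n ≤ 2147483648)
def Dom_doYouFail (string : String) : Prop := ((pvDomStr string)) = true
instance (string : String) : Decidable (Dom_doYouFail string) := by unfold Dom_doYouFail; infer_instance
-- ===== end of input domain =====

-- B replaces A's per-character counter-and-break loop by one split("A", 3) and a shape test on the parts (measurably faster: the split runs in C).

-- ===== PORT A =====
-- A's for-loop with its break: the state is the counter; judge is only ever set right before the break
def pvLoopA : List Char → Int → String
  | [], _ => "pass"
  | c :: rest, count =>
    if 3 ≤ count then "fail"
    else pvLoopA rest (if c = 'A' then count + 1 else count)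

def doYouFail (string : String) : String := pvLoopA string.toList 0

-- ===== PORT B =====
-- B splits on "A" with maxsplit 3; "fail" iff 4 parts and the last part is nonempty
-- (string.split("A", 3) never returns None since the separator is nonempty; getD [] is unreachable)
def doYouFail_alt (string : String) : String :=
  let parts := (PySem.Str.splitMax? string "A" 3).getD []
  if parts.length = 4 ∧ PySem.List.pyGet? parts 3 ≠ some "" then "fail" else "pass"

-- ===== PRECONDITION & SPEC =====
def Spec_doYouFail (string : String) (out : String) : Prop := out = doYouFail_alt string
instance (string : String) (out : String) : Decidable (Spec_doYouFail string out) := by unfold Spec_doYouFail; infer_instance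

-- ===== CLAIM (what is proved, stated in full; the proofs are below) =====
def Claim_equal_doYouFail : Prop := ∀ (string : String), Dom_doYouFail string → Spec_doYouFail string (doYouFail string)

-- ===== LEMMAS AND PROOFS =====

-- A's loop fails iff the counter can reach 3 strictly before the last character is processed
theorem pvLoopA_char : ∀ (cs : List Char) (count : Int),
    pvLoopA cs count =
      if 3 ≤ count + (cs.dropLast.count 'A' : Int) ∧ cs ≠ [] then "fail" else "pass" := by
  intro cs
  induction cs with
  | nil => intro count; simp [pvLoopA]
  | cons c rest ih =>
    intro count
    cases rest with
    | nil =>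
      have h0 : (([c] : List Char).dropLast.count 'A' : Int) = 0 := by simp
      rw [pvLoopA, h0]
      simp only [pvLoopA, ne_eq, List.cons_ne_nil, not_false_eq_true, and_true]
      split_ifs with h1 h2 h2 <;> first | rfl | omega
    | cons d rest' =>
      rw [pvLoopA, ih]
      have h0 : (0 : Int) ≤ ((d :: rest').dropLast.count 'A' : Int) := Int.natCast_nonneg _
      have hdl : ((c :: d :: rest').dropLast.count 'A' : Int) =
          (if c = 'A' then 1 else 0) + ((d :: rest').dropLast.count 'A' : Int) := by
        by_cases hc : c = 'A' <;> simp [hc] <;> omega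
      rw [hdl]
      simp only [ne_eq, List.cons_ne_nil, not_false_eq_true, and_true]
      by_cases hc : c = 'A' <;>
        · simp only [hc, if_pos]
          split_ifs <;> first | rfl | omega

-- A clean fuel-free model of splitOnMax.go specialised to the one-character separator 'A'
def pvSplitA : Nat → List Char → List Char → List (List Char)
  | _, [], cur => [cur.reverse]
  | 0, l, cur => [cur.reverse ++ l]
  | m + 1, c :: rest, cur =>
    if c = 'A' then cur.reverse :: pvSplitA m rest []
    else pvSplitA (m + 1) rest (c :: cur)

theorem pvSplitA_ne_nil : ∀ (m : Nat) (l cur : List Char), pvSplitA m l cur ≠ [] := by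
  intro m l
  induction l generalizing m with
  | nil => intro cur; simp [pvSplitA]
  | cons c rest ih =>
    intro cur
    cases m with
    | zero => simp [pvSplitA]
    | succ m =>
      by_cases hc : c = 'A'
      · simp [pvSplitA, hc]
      · simpa [pvSplitA, hc] using ih (m + 1) (c :: cur)

theorem go_eq_pvSplitA : ∀ (l : List Char) (fuel m : Nat) (cur : List Char)
    (acc : List (List Char)), l.length ≤ fuel →
    PySem.Chars.splitOnMax.go ['A'] fuel m l cur acc = acc.reverse ++ pvSplitA m l cur := by
  intro l
  induction l with
  | nil =>
    intro fuel m cur acc _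
    cases fuel <;> simp [PySem.Chars.splitOnMax.go, pvSplitA]
  | cons c rest ih =>
    intro fuel m cur acc h
    cases fuel with
    | zero => simp at h
    | succ f =>
      have hf : rest.length ≤ f := by simpa using h
      rw [PySem.Chars.splitOnMax.go]
      cases m with
      | zero => simp [pvSplitA]
      | succ m =>
        by_cases hc : c = 'A'
        · subst hc
          rw [if_neg (by omega), if_pos (by simp [List.isPrefixOf])]
          simp only [Nat.add_sub_cancel, List.length_cons, List.length_nil]
          rw [List.drop_one, List.tail_cons, ih f m [] (cur.reverse :: acc) hf]
          simp [pvSplitA]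
        · rw [if_neg (by omega),
            if_neg (by simp [List.isPrefixOf]; exact fun h' => hc h'.symm),
            ih f (m + 1) (c :: cur) acc hf]
          simp [pvSplitA, hc]

theorem splitOnMax_eq_pvSplitA (l : List Char) :
    PySem.Chars.splitOnMax l ['A'] 3 = pvSplitA 3 l [] := by
  rw [PySem.Chars.splitOnMax, if_neg (by omega)]
  simpa using go_eq_pvSplitA l (l.length + 1) 3 [] [] (by omega)

-- shape of the split ↔ the counter condition of A's loop
theorem pvSplitA_char : ∀ (l : List Char) (m : Nat) (cur : List Char),
    ((pvSplitA m l cur).length = m + 1 ∧ (pvSplitA m l cur).getLast? ≠ some []) ↔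
      (if m = 0 then l ≠ [] ∨ cur ≠ [] else m ≤ l.dropLast.count 'A') := by
  intro l
  induction l with
  | nil =>
    intro m cur
    cases m with
    | zero => simp [pvSplitA]
    | succ m => simp [pvSplitA]
  | cons c rest ih =>
    intro m cur
    cases m with
    | zero => simp [pvSplitA]
    | succ m =>
      have hdl : (c :: rest).dropLast.count 'A' =
          if rest = [] then 0 else (if c = 'A' then 1 else 0) + rest.dropLast.count 'A' := by
        cases rest with
        | nil => simp
        | cons d r =>
          by_cases hc : c = 'A'
          · simp [hc]
            omega
          · simp [List.dropLast_cons_of_ne_nil (List.cons_ne_nil d r), hc]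
      by_cases hc : c = 'A'
      · have hne := pvSplitA_ne_nil m rest []
        have hstep : pvSplitA (m + 1) (c :: rest) cur = cur.reverse :: pvSplitA m rest [] := by
          simp [pvSplitA, hc]
        have hlast : (cur.reverse :: pvSplitA m rest []).getLast? = (pvSplitA m rest []).getLast? := by
          cases h : pvSplitA m rest [] with
          | nil => exact absurd h hne
          | cons x xs => exact List.getLast?_cons_cons
        rw [hstep, hlast, List.length_cons,
          Nat.add_left_inj, if_neg (Nat.succ_ne_zero m), hdl, if_pos hc, ih m []]
        by_cases hr : rest = []
        · subst hr
          cases m with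
          | zero => simp
          | succ k => simp
        · rw [if_neg hr]
          simp
          by_cases hm : m = 0
          · subst hm; simp [hr]
          · rw [if_neg hm]; omega
      · have hstep : pvSplitA (m + 1) (c :: rest) cur = pvSplitA (m + 1) rest (c :: cur) := by
          simp [pvSplitA, hc]
        rw [hstep, if_neg (Nat.succ_ne_zero m), hdl, if_neg hc, ih (m + 1) (c :: cur),
          if_neg (Nat.succ_ne_zero m)]
        by_cases hr : rest = []
        · subst hr; simp
        · rw [if_neg hr]
          simp

-- B's test, pushed down to lists
theorem alt_char (s : String) :
    doYouFail_alt s =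
      if 3 ≤ s.toList.dropLast.count 'A' then "fail" else "pass" := by
  have hsplit : PySem.Str.splitMax? s "A" 3 =
      some ((pvSplitA 3 s.toList []).map String.ofList) := by
    rw [PySem.Str.splitMax?, PySem.Chars.splitMax?]
    rw [if_neg (by decide)]
    have : ("A" : String).toList = ['A'] := rfl
    rw [this, splitOnMax_eq_pvSplitA]
    rfl
  rw [doYouFail_alt]
  simp only [hsplit, Option.getD_some]
  have hch := pvSplitA_char s.toList 3 []
  rw [if_neg (by omega)] at hch
  have hne := pvSplitA_ne_nil 3 s.toList []
  -- relate the mapped list's length / 4th element to the raw list's length / last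
  by_cases h3 : 3 ≤ s.toList.dropLast.count 'A'
  · have ⟨hlen, hlast⟩ := hch.mpr h3
    rw [if_pos, if_pos h3]
    refine ⟨by simpa using hlen, ?_⟩
    have hg : PySem.List.pyGet? ((pvSplitA 3 s.toList []).map String.ofList) 3 =
        ((pvSplitA 3 s.toList []).map String.ofList).getLast? := by
      rw [List.getLast?_eq_getElem?]
      simp [PySem.List.pyGet?, PySem.List.pyIdx?, hlen]
    rw [hg, List.getLast?_map]
    intro hcon
    rcases Option.map_eq_some_iff.mp hcon with ⟨x, hx, hofx⟩
    apply hlast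
    rw [hx]
    have : x = [] := by
      have := congrArg String.toList hofx
      simpa using this
    rw [this]
  · rw [if_neg, if_neg h3]
    intro ⟨hlen, hlast⟩
    apply h3
    apply hch.mp
    refine ⟨by simpa using hlen, ?_⟩
    have hlen' : (pvSplitA 3 s.toList []).length = 4 := by simpa using hlen
    have hg : PySem.List.pyGet? ((pvSplitA 3 s.toList []).map String.ofList) 3 =
        ((pvSplitA 3 s.toList []).map String.ofList).getLast? := by
      rw [List.getLast?_eq_getElem?]
      simp [PySem.List.pyGet?, PySem.List.pyIdx?, hlen']
    rw [hg, List.getLast?_map] at hlast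
    intro hcon
    apply hlast
    rw [hcon]
    rfl

theorem doYouFail_eq_alt (s : String) : doYouFail s = doYouFail_alt s := by
  rw [doYouFail, pvLoopA_char, alt_char]
  by_cases h3 : 3 ≤ s.toList.dropLast.count 'A'
  · have hne : s.toList ≠ [] := by
      intro h; rw [h] at h3; simp at h3
    rw [if_pos h3, if_pos ⟨by omega, hne⟩]
  · rw [if_neg h3, if_neg]
    intro ⟨h1, _⟩
    apply h3
    have : (0 : Int) + (s.toList.dropLast.count 'A' : Int) = s.toList.dropLast.count 'A' := by omega
    omega

-- ===== VERDICT (by name: the statement is the Claim_ definition above) =====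
theorem doYouFail_spec : Claim_equal_doYouFail := by
  intro s _
  exact doYouFail_eq_alt s
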